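-- pv_equiv track=rewrite | github.com/ShruthiArun/Encryption-Calcu | all.py | key_arr_create
-- ===== SOURCE A (Python) =====
-- def key_arr_create(k):
--     if len(k) < 256:  # len(s) is 256 here
--         a = []
--         q = int(256/len(k))
--
--         r = 256 % len(k)
--
--         for i in range(q):
--             for x in k:
--                 a.append(ord(x))
--
--         if r != 0:
--             for x in k:
--                 if r != 0:
--                     a.append(ord(x))
--                 else:
--                     break
--                 r -= 1
--
--         return a
-- ===== SOURCE B (Python) =====
-- def key_arr_create(k):
--     if len(k) < 256:
--         return [ord(k[i % len(k)]) for i in range(256)]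
-- ===== Notes on version B (the rewrite author's own statement) =====
-- stated objective: simpler
-- what changed: Replaces the quotient-of-full-copies loop plus the manual remainder-countdown loop with a single cyclic-index comprehension ord(k[i % len(k)]) over range(256).
import Mathlib
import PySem

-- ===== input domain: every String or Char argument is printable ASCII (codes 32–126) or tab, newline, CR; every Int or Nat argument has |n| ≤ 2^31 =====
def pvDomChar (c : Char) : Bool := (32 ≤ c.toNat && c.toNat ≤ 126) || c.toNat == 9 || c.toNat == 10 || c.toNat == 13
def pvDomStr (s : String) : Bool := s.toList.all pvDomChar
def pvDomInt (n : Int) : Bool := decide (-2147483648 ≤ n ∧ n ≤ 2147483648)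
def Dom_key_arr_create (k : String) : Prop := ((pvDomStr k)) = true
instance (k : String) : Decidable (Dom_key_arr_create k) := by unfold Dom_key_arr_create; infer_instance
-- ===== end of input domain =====

-- B replaces A's quotient-of-full-copies loop plus remainder-countdown loop with one
-- cyclic-index comprehension ord(k[i % len(k)]) over range(256): simpler, same cost.


-- ===== PORT A =====
def pvOrd (c : Char) : Int := Int.ofNat c.toNat

-- the remainder loop: for x in k: if r != 0: a.append(ord(x)) else: break; r -= 1
def pvRemLoop : List Char → Int → List Int → List Int
  | [], _, a => a
  | c :: cs, r, a => if r ≠ 0 then pvRemLoop cs (r - 1) (a ++ [pvOrd c]) else a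

def key_arr_create (k : String) : Option (List Int) :=
  if PySem.Str.len k < 256 then
    -- q = int(256/len(k)): for 1 ≤ len(k) ≤ 255 the float division then int() truncation
    -- equals floor division (the float error is far below the distance to the next integer)
    let q : Int := PySem.Int.floordiv 256 (PySem.Str.len k)
    let r : Int := PySem.Int.mod 256 (PySem.Str.len k)
    let a : List Int :=
      (PySem.List.pyRange 0 q 1).foldl
        (fun a _ => k.toList.foldl (fun a x => a ++ [pvOrd x]) a) []
    some (if r ≠ 0 then pvRemLoop k.toList r a else a)
  else none

-- ===== PORT B =====
def key_arr_create_alt (k : String) : Option (List Int) :=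
  if PySem.Str.len k < 256 then
    -- [ord(k[i % len(k)]) for i in range(256)]; the index is always in range, so the
    -- .getD 0 default of the totalised pyGet? is never used
    some ((PySem.List.pyRange 0 256 1).map (fun i =>
      ((PySem.Str.pyGet? k (PySem.Int.mod i (PySem.Str.len k))).map pvOrd).getD 0))
  else none

-- ===== PRECONDITION & SPEC =====
-- Pre_ excludes only the empty key, on which A raises ZeroDivisionError (B raises it too).
def Pre_key_arr_create (k : String) : Prop := k ≠ ""
instance (k : String) : Decidable (Pre_key_arr_create k) := by unfold Pre_key_arr_create; infer_instance
def pvWitness_key_arr_create : String := "ab"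
def Spec_key_arr_create (k : String) (out : Option (List Int)) : Prop := out = key_arr_create_alt k
instance (k : String) (out : Option (List Int)) : Decidable (Spec_key_arr_create k out) := by unfold Spec_key_arr_create; infer_instance

-- ===== CLAIM (what is proved, stated in full; the proofs are below) =====
def Claim_equal_key_arr_create : Prop := ∀ (k : String), Dom_key_arr_create k → Pre_key_arr_create k → Spec_key_arr_create k (key_arr_create k)

-- ===== LEMMAS AND PROOFS =====

-- A's inner loop is map
theorem pv_foldl_ord (cs : List Char) (init : List Int) :
    cs.foldl (fun a x => a ++ [pvOrd x]) init = init ++ cs.map pvOrd := by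
  induction cs generalizing init with
  | nil => simp
  | cons c cs ih => rw [List.foldl_cons, ih]; simp

-- A's outer loop appends the full block once per iteration
theorem pv_outer (cs : List Char) (l : List Int) (init : List Int) :
    l.foldl (fun a _ => cs.foldl (fun a x => a ++ [pvOrd x]) a) init
      = init ++ (List.replicate l.length (cs.map pvOrd)).flatten := by
  induction l generalizing init with
  | nil => simp
  | cons x xs ih =>
    rw [List.foldl_cons, pv_foldl_ord, ih, List.length_cons, List.replicate_succ,
        List.flatten_cons, List.append_assoc]

-- A's remainder loop appends ord of the first r characters
theorem pv_remLoop_eq (cs : List Char) (r : Nat) (a : List Int) :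
    pvRemLoop cs (r : Int) a = a ++ (cs.take r).map pvOrd := by
  induction cs generalizing r a with
  | nil => simp [pvRemLoop]
  | cons c cs ih =>
    cases r with
    | zero => simp [pvRemLoop]
    | succ s =>
      have h : ¬(((s + 1 : Nat) : Int) = 0) := by push_cast; omega
      have h1 : ((s + 1 : Nat) : Int) - 1 = (s : Int) := by push_cast; ring
      rw [pvRemLoop, if_pos h, h1, ih]
      simp

-- A's whole body after the guard
theorem pv_A_val (cs : List Char) :
    (if ((256 % cs.length : Nat) : Int) ≠ 0
       then pvRemLoop cs ((256 % cs.length : Nat) : Int)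
              ((List.replicate (256 / cs.length) (cs.map pvOrd)).flatten)
       else (List.replicate (256 / cs.length) (cs.map pvOrd)).flatten)
    = (List.replicate (256 / cs.length) (cs.map pvOrd)).flatten
        ++ (cs.take (256 % cs.length)).map pvOrd := by
  by_cases h0 : (256 % cs.length) = 0
  · rw [if_neg (by simp [h0])]
    simp [h0]
  · rw [if_pos (by exact_mod_cast h0), pv_remLoop_eq]

-- cyclic indexing over range m = full blocks ++ remainder
theorem pv_cycle_eq (cs : List Char) (m : Nat) (hn : 0 < cs.length) :
    (List.range m).map (fun j => pvOrd (cs.getD (j % cs.length) 'A'))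
      = (List.replicate (m / cs.length) (cs.map pvOrd)).flatten
        ++ ((cs.take (m % cs.length)).map pvOrd) := by
  induction m using Nat.strong_induction_on with
  | _ m ih =>
    by_cases hm : m < cs.length
    · have hq : m / cs.length = 0 := Nat.div_eq_of_lt hm
      have hr : m % cs.length = m := Nat.mod_eq_of_lt hm
      rw [hq, hr]
      simp only [List.replicate, List.flatten_nil, List.nil_append]
      apply List.ext_getElem
      · simp; omega
      · intro i h1 h2
        have hi : i < m := by simpa using h1
        have hmod : i % cs.length = i := Nat.mod_eq_of_lt (by omega)
        simp [hmod, List.getD_eq_getElem?_getD, List.getElem?_eq_getElem (by omega : i < cs.length),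
              List.getElem_take]
    · rw [not_lt] at hm
      obtain ⟨m', rfl⟩ : ∃ m', m = cs.length + m' := ⟨m - cs.length, by omega⟩
      have hq : (cs.length + m') / cs.length = m' / cs.length + 1 := by
        rw [Nat.add_comm, Nat.add_div_right _ hn]
      have hr : (cs.length + m') % cs.length = m' % cs.length := by
        rw [Nat.add_comm, Nat.add_mod_right]
      rw [hq, hr, List.range_add, List.map_append, List.map_map]
      have hfirst : (List.range cs.length).map (fun j => pvOrd (cs.getD (j % cs.length) 'A'))
          = cs.map pvOrd := by
        apply List.ext_getElem
        · simp
        · intro i h1 h2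
          have hi : i < cs.length := by simpa using h1
          have hmod : i % cs.length = i := Nat.mod_eq_of_lt hi
          simp [hmod, List.getD_eq_getElem?_getD, List.getElem?_eq_getElem hi]
      have hshift : (List.range m').map ((fun j => pvOrd (cs.getD (j % cs.length) 'A')) ∘
            (fun j => cs.length + j))
          = (List.range m').map (fun j => pvOrd (cs.getD (j % cs.length) 'A')) := by
        apply List.map_congr_left
        intro j _
        simp [Function.comp, Nat.add_mod_left]
      rw [hshift, ih m' (by omega), hfirst, List.replicate_succ, List.flatten_cons,
          List.append_assoc]

-- B's comprehension is cyclic indexing over range 256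
theorem pv_B_val (k : String) (hn : 0 < k.toList.length) :
    (PySem.List.pyRange 0 256 1).map (fun i =>
        ((PySem.Str.pyGet? k (PySem.Int.mod i (PySem.Str.len k))).map pvOrd).getD 0)
      = (List.range 256).map (fun j => pvOrd (k.toList.getD (j % k.toList.length) 'A')) := by
  rw [PySem.List.pyRange_one]
  rw [show ((256:Int) - 0).toNat = 256 from rfl, List.map_map]
  apply List.map_congr_left
  intro j hj
  have hidx : j % k.toList.length < k.toList.length := Nat.mod_lt _ hn
  have hz : ((0 : Int) + (j : Int)) = ((j : Nat) : Int) := by ring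
  have hlen : PySem.Str.len k = ((k.toList.length : Nat) : Int) := by
    simp [PySem.Str.len_eq]
  have hmod : PySem.Int.mod ((j : Nat) : Int) ((k.toList.length : Nat) : Int)
      = ((j % k.toList.length : Nat) : Int) := PySem.Int.mod_natCast j k.toList.length
  simp only [Function.comp, hz, hlen, hmod]
  simp only [PySem.Str.pyGet?]
  rw [PySem.Chars.pyGet?_eq_listPyGet?, PySem.List.pyGet?_natCast,
      List.getElem?_eq_getElem hidx, List.getD_eq_getElem?_getD,
      List.getElem?_eq_getElem hidx]
  simp

theorem key_arr_create_eq_alt (k : String) (hk : k ≠ "") :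
    key_arr_create k = key_arr_create_alt k := by
  have hk' : k.toList ≠ [] := by
    intro h; apply hk; rwa [← String.toList_inj]
  have hn : 0 < k.toList.length := List.length_pos_iff.mpr hk'
  have hlen : PySem.Str.len k = ((k.toList.length : Nat) : Int) := by
    simp [PySem.Str.len_eq]
  -- zeta-reduced form of key_arr_create k (definitionally equal)
  show (if PySem.Str.len k < 256 then
      some (if PySem.Int.mod 256 (PySem.Str.len k) ≠ 0
        then pvRemLoop k.toList (PySem.Int.mod 256 (PySem.Str.len k))
          ((PySem.List.pyRange 0 (PySem.Int.floordiv 256 (PySem.Str.len k)) 1).foldl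
            (fun a _ => k.toList.foldl (fun a x => a ++ [pvOrd x]) a) [])
        else (PySem.List.pyRange 0 (PySem.Int.floordiv 256 (PySem.Str.len k)) 1).foldl
            (fun a _ => k.toList.foldl (fun a x => a ++ [pvOrd x]) a) [])
    else none) = key_arr_create_alt k
  unfold key_arr_create_alt
  rw [hlen]
  by_cases hlt : (((k.toList.length : Nat) : Int)) < 256
  · rw [if_pos hlt, if_pos hlt]
    congr 1
    have hq : PySem.Int.floordiv 256 ((k.toList.length : Nat) : Int)
        = ((256 / k.toList.length : Nat) : Int) := by
      exact_mod_cast PySem.Int.floordiv_natCast 256 k.toList.length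
    have hr : PySem.Int.mod 256 ((k.toList.length : Nat) : Int)
        = ((256 % k.toList.length : Nat) : Int) := by
      exact_mod_cast PySem.Int.mod_natCast 256 k.toList.length
    rw [hq, hr]
    have hlenR : (PySem.List.pyRange 0 ((256 / k.toList.length : Nat) : Int) 1).length
        = 256 / k.toList.length := by
      rw [PySem.List.length_pyRange_one]
      generalize 256 / k.toList.length = m
      omega
    rw [pv_outer, hlenR, List.nil_append, pv_A_val, ← hlen, pv_B_val k hn,
        pv_cycle_eq k.toList 256 hn]
  · rw [if_neg hlt, if_neg hlt]

-- ===== VERDICT (by name: the statement is the Claim_ definition above) =====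
theorem key_arr_create_spec : Claim_equal_key_arr_create := by
  intro k _ hpre
  unfold Spec_key_arr_create
  exact key_arr_create_eq_alt k hpre
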